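-- pv_equiv track=rewrite | github.com/OdielDomanie/stream_tagger | stream_tagger/tag_command.py | parse_ticks
-- ===== SOURCE A (Python) =====
-- def parse_ticks(content: str) -> tuple[str, int]:
--     "Return stripped content, and hierarchy. Raise ValueError if no backtick."
--     ticks = 0
--     spaces = 0
--     for c in content:
--         if c == "`":
--             ticks += 1
--         elif c == " ":
--             spaces += 1
--         else:
--             break
--     if not ticks:
--         raise ValueError
--     else:
--         return content[ticks + spaces :], ticks - 1
-- ===== SOURCE B (Python) =====
-- def parse_ticks(content: str) -> tuple[str, int]:
--     "Return stripped content, and hierarchy. Raise ValueError if no backtick."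
--     stripped = content.lstrip("` ")
--     prefix = content[: len(content) - len(stripped)]
--     ticks = prefix.count("`")
--     if not ticks:
--         raise ValueError
--     return stripped, ticks - 1
-- ===== Notes on version B (the rewrite author's own statement) =====
-- stated objective: simpler
-- what changed: Replaces the fused counting loop with manual ticks/spaces accumulators by an lstrip over the backtick-and-space character set to get the tail, then a count of backticks in the stripped-off prefix.
import Mathlib
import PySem

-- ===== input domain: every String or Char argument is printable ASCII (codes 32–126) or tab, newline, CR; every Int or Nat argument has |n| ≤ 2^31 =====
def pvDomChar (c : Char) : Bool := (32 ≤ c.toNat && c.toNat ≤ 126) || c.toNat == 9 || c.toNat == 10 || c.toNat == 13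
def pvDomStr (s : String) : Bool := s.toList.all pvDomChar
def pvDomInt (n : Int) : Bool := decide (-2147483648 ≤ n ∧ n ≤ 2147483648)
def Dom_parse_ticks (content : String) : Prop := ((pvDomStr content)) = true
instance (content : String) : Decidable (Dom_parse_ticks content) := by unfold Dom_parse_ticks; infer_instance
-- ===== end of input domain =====

-- B replaces A's fused counting loop by an lstrip over the backtick-and-space character set plus a backtick count of the stripped-off prefix (simpler decomposition).


-- ===== PORT A =====
-- the for-loop with break, accumulating ticks and spaces
def parse_ticks_loop : List Char → Int → Int → Int × Int
  | [], ticks, spaces => (ticks, spaces)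
  | c :: cs, ticks, spaces =>
      if c = '`' then parse_ticks_loop cs (ticks + 1) spaces
      else if c = ' ' then parse_ticks_loop cs ticks (spaces + 1)
      else (ticks, spaces)

def parse_ticks (content : String) : String × Int :=
  let (ticks, spaces) := parse_ticks_loop content.toList 0 0
  if ticks = 0 then ("", -1)  -- Python raises ValueError here; excluded by Pre_parse_ticks
  else (String.ofList (PySem.List.slice content.toList (some (ticks + spaces)) none), ticks - 1)

-- ===== PORT B =====
def parse_ticks_alt (content : String) : String × Int :=
  -- content.lstrip of backtick-and-space: exact — lstrip with a character set drops the longest prefix of those chars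
  let stripped := content.toList.dropWhile (fun c => c == '`' || c == ' ')
  let pre := content.toList.take (content.toList.length - stripped.length)  -- content[:len-len(stripped)]
  let ticks := pre.count '`'
  if ticks = 0 then ("", -1)  -- Python raises ValueError here; excluded by Pre_parse_ticks
  else (String.ofList stripped, (ticks : Int) - 1)

-- ===== PRECONDITION & SPEC =====
-- Pre_ excludes exactly the inputs with no backtick before the first non-backtick-non-space
-- character, where the Python A (and B) raises ValueError.
def Pre_parse_ticks (content : String) : Prop :=
  '`' ∈ content.toList.takeWhile (fun c => c == '`' || c == ' ')
instance (content : String) : Decidable (Pre_parse_ticks content) := by unfold Pre_parse_ticks; infer_instance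

def pvWitness_parse_ticks : String := "`` hello"

def Spec_parse_ticks (content : String) (out : String × Int) : Prop := out = parse_ticks_alt content
instance (content : String) (out : String × Int) : Decidable (Spec_parse_ticks content out) := by unfold Spec_parse_ticks; infer_instance

-- ===== CLAIM (what is proved, stated in full; the proofs are below) =====
def Claim_equal_parse_ticks : Prop := ∀ (content : String), Dom_parse_ticks content → Pre_parse_ticks content → Spec_parse_ticks content (parse_ticks content)

-- ===== LEMMAS AND PROOFS =====

-- the loop computes the counts of '`' and ' ' in the takeWhile-prefix
theorem parse_ticks_loop_eq (l : List Char) (t s : Int) :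
    parse_ticks_loop l t s =
      (t + ((l.takeWhile (fun c => c == '`' || c == ' ')).count '`' : Int),
       s + ((l.takeWhile (fun c => c == '`' || c == ' ')).count ' ' : Int)) := by
  induction l generalizing t s with
  | nil => simp [parse_ticks_loop]
  | cons c cs ih =>
      by_cases hb : c = '`'
      · subst hb
        simp [parse_ticks_loop, List.takeWhile, ih]
        ring
      · by_cases hs : c = ' '
        · subst hs
          simp [parse_ticks_loop, List.takeWhile, ih]
          ring
        · simp [parse_ticks_loop, hb, hs, List.takeWhile,
            show (c == '`' || c == ' ') = false by simp [hb, hs]]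

-- on a list all of whose elements are '`' or ' ', the two counts sum to the length
theorem count_sum_of_all (l : List Char)
    (h : ∀ c ∈ l, (c == '`' || c == ' ') = true) :
    l.count '`' + l.count ' ' = l.length := by
  induction l with
  | nil => simp
  | cons c cs ih =>
      have hc := h c (by simp)
      have hcs : ∀ x ∈ cs, (x == '`' || x == ' ') = true := fun x hx => h x (by simp [hx])
      rcases Bool.or_eq_true_iff.mp hc with h1 | h1
      · have : c = '`' := by simpa using h1
        subst this
        have h2 := ih hcs
        simp
        omega
      · have : c = ' ' := by simpa using h1
        subst this
        have h2 := ih hcs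
        simp
        omega

theorem parse_ticks_spec_aux (content : String) (hpre : Pre_parse_ticks content) :
    parse_ticks content = parse_ticks_alt content := by
  unfold Pre_parse_ticks at hpre
  unfold parse_ticks parse_ticks_alt
  set p := fun c => (c == '`' || c == ' ') with hp
  set l := content.toList with hl
  set tw := l.takeWhile p with htw
  have hall : ∀ c ∈ tw, p c = true := fun c hc => List.mem_takeWhile_imp hc
  have hsum : tw.count '`' + tw.count ' ' = tw.length := count_sum_of_all tw hall
  -- A's loop
  rw [parse_ticks_loop_eq]
  have htick_pos : 0 < tw.count '`' := List.count_pos_iff.mpr hpre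
  -- prefix/stripped identification for B
  have hsplit : tw ++ l.dropWhile p = l := List.takeWhile_append_dropWhile
  have hdroplen : l.dropWhile p = l.drop tw.length := by
    conv_rhs => rw [← hsplit]
    simp
  have hlen : l.length - (l.dropWhile p).length = tw.length := by
    rw [hdroplen, List.length_drop]
    have : tw.length ≤ l.length := by
      conv_rhs => rw [← hsplit]
      simp only [List.length_append]
      omega
    omega
  have hprefix : l.take (l.length - (l.dropWhile p).length) = tw := by
    rw [hlen]
    conv_lhs => rw [← hsplit]
    simp
  simp only [← hp, ← htw, hprefix]
  have hA0 : ¬ ((0 : Int) + (tw.count '`' : Int) = 0) := by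
    omega
  have hB0 : ¬ (tw.count '`' = 0) := by omega
  rw [if_neg hA0, if_neg hB0]
  simp only [Prod.mk.injEq]
  constructor
  · -- strings equal
    have : (0 : Int) + (tw.count '`' : Int) + ((0 : Int) + (tw.count ' ' : Int)) = (tw.length : Int) := by
      push_cast [← hsum]; ring
    rw [this, PySem.List.slice_from_natCast, ← hdroplen]
  · push_cast; ring

-- ===== VERDICT (by name: the statement is the Claim_ definition above) =====
theorem parse_ticks_spec : Claim_equal_parse_ticks := by
  intro content _ hpre
  exact parse_ticks_spec_aux content hpre
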